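-- pv_equiv track=rewrite | github.com/SamuelN1508/LaPrakAlPro6 | 6,1.py | ganjil_prima_tertinggi
-- ===== SOURCE A (Python) =====
-- def ganjil_prima_tertinggi(batas):
--     # Memulai Perulangan for dengan range batas dari besar ke kecil
--     for i in range(batas-1, 2, -1):
--         # j = 2 karena bilangan prima semua bisa dibagi 1
--         j = 2
--         # Perulangan untuk membagi i dengan j satu persatu untuk mencari bilangan prima
--         while i >= j:
--             # Jika bilangan bilangan j tidak bisa membagi i maka artinya i bilangan prima
--             if i == j:
--                 return i
--             else:
--                 # Jika bisa dibagi dengan j maka break karena bukan prima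
--                 if i % j == 0:
--                     break
--                 # Jika tidak bisa dibagi dengan j maka lanjut ke bilangan j + 1
--                 # Dan seterusnya sampai mendapatkan bilangan prima
--                 else:
--                     j += 1
--                     continue
-- ===== SOURCE B (Python) =====
-- # B: same descending search, but primality by trial division only up to sqrt(i)
-- # (d*d <= i) instead of A's full scan up to i itself.
--
-- def _is_prime(n, d=2):
--     while d * d <= n:
--         if n % d == 0:
--             return False
--         d += 1
--     return True
--
-- def ganjil_prima_tertinggi(batas):
--     for i in range(batas - 1, 2, -1):
--         if _is_prime(i):
--             return i
-- ===== Notes on version B (the rewrite author's own statement) =====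
-- stated objective: faster
-- what changed: Primality of each candidate is decided by trial division only up to sqrt(i) (while d*d <= i) instead of A's inner loop that scans every divisor candidate up to i itself.
import Mathlib
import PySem

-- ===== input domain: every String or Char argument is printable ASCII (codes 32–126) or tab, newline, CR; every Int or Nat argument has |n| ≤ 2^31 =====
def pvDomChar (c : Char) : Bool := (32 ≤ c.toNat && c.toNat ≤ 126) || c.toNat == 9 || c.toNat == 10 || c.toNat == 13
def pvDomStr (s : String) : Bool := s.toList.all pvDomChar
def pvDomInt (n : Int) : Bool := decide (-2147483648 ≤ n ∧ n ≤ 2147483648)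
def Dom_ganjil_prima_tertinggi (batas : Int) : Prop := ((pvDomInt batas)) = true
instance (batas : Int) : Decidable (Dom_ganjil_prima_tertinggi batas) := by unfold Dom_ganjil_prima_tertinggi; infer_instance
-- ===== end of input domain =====

-- B replaces A's per-candidate divisor scan up to i by one bounded by sqrt(i) (d*d ≤ i): asymptotically faster.

-- ===== PORT A =====
-- A's inner `while i >= j:` loop: return i when i == j, break (none) when i % j == 0, else j += 1.
def pvTrialA (i j : Int) : Option Int :=
  if _h : j ≤ i then
    if i = j then some i
    else if PySem.Int.mod i j = 0 then none
    else pvTrialA i (j + 1)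
  else none
termination_by (i - j).toNat
decreasing_by omega

-- A's outer `for i in range(batas-1, 2, -1):` loop.
def pvLoopA : List Int → Option Int
  | [] => none
  | i :: rest =>
    match pvTrialA i 2 with
    | some r => some r
    | none => pvLoopA rest

def ganjil_prima_tertinggi (batas : Int) : Option Int :=
  pvLoopA (PySem.List.pyRange (batas - 1) 2 (-1))

-- ===== PORT B =====
-- B's `while d*d <= n:` trial division bounded by sqrt(n).
def pvIsPrimeB (n d : Int) : Bool :=
  if _h : d * d ≤ n then
    if PySem.Int.mod n d = 0 then false
    else pvIsPrimeB n (d + 1)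
  else true
termination_by (n + 1 - d).toNat
decreasing_by
  have hdn : d ≤ n := by nlinarith [mul_self_nonneg (d - 1), mul_self_nonneg d]
  omega

def pvLoopB : List Int → Option Int
  | [] => none
  | i :: rest => if pvIsPrimeB i 2 then some i else pvLoopB rest

def ganjil_prima_tertinggi_alt (batas : Int) : Option Int :=
  pvLoopB (PySem.List.pyRange (batas - 1) 2 (-1))

-- ===== PRECONDITION & SPEC =====
def Spec_ganjil_prima_tertinggi (batas : Int) (out : Option Int) : Prop := out = ganjil_prima_tertinggi_alt batas
instance (batas : Int) (out : Option Int) : Decidable (Spec_ganjil_prima_tertinggi batas out) := by unfold Spec_ganjil_prima_tertinggi; infer_instance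

-- ===== CLAIM (what is proved, stated in full; the proofs are below) =====
def Claim_equal_ganjil_prima_tertinggi : Prop := ∀ (batas : Int), Dom_ganjil_prima_tertinggi batas → Spec_ganjil_prima_tertinggi batas (ganjil_prima_tertinggi batas)

-- ===== LEMMAS AND PROOFS =====

-- A's inner loop characterisation: for 2 ≤ j ≤ i it returns some i iff no d in [j, i) divides i.
theorem pvTrialA_some_iff (i j : Int) (hj : 2 ≤ j) (hji : j ≤ i) :
    pvTrialA i j = some i ↔ ∀ d : Int, j ≤ d → d < i → ¬ d ∣ i := by
  revert hj hji
  induction j using pvTrialA.induct (i := i) with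
  | case1 h =>
    intro hj hji
    rw [pvTrialA]
    simp only [dif_pos h]
    constructor
    · intro _ d hd1 hd2 _; omega
    · intro _; rfl
  | case2 x h hne hmod =>
    intro hj hji
    rw [pvTrialA]
    simp only [dif_pos h, if_neg hne, if_pos hmod]
    rw [PySem.Int.mod_eq_zero_iff_dvd] at hmod
    constructor
    · intro hc; exact absurd hc (by simp)
    · intro hall; exact absurd hmod (hall x le_rfl (by omega))
  | case3 x h hne hmod ih =>
    intro hj hji
    rw [pvTrialA]
    simp only [dif_pos h, if_neg hne, if_neg hmod]
    rw [PySem.Int.mod_eq_zero_iff_dvd] at hmod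
    rw [ih (by omega) (by omega)]
    constructor
    · intro hall d hd1 hd2
      rcases eq_or_lt_of_le hd1 with rfl | hlt
      · exact hmod
      · exact hall d (by omega) hd2
    · intro hall d hd1 hd2; exact hall d (by omega) hd2
  | case4 x h =>
    intro hj hji; omega

-- A's inner loop never returns a value other than i.
theorem pvTrialA_eq_none_or_self (i j : Int) :
    pvTrialA i j = none ∨ pvTrialA i j = some i := by
  induction j using pvTrialA.induct (i := i) with
  | case1 h => rw [pvTrialA]; simp
  | case2 x h hne hmod =>
    rw [pvTrialA]; simp [h, hne, hmod]
  | case3 x h hne hmod ih =>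
    rw [pvTrialA]; simpa [h, hne, hmod] using ih
  | case4 x h => rw [pvTrialA]; simp [h]

-- B's loop characterisation: for 2 ≤ d it returns true iff no e ≥ d with e*e ≤ n divides n.
theorem pvIsPrimeB_true_iff (n d : Int) (hd : 2 ≤ d) :
    pvIsPrimeB n d = true ↔ ∀ e : Int, d ≤ e → e * e ≤ n → ¬ e ∣ n := by
  revert hd
  induction d using pvIsPrimeB.induct (n := n) with
  | case1 x h hmod =>
    intro hd
    rw [pvIsPrimeB]
    simp only [dif_pos h, if_pos hmod]
    rw [PySem.Int.mod_eq_zero_iff_dvd] at hmod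
    constructor
    · intro hc; exact absurd hc (by simp)
    · intro hall; exact absurd hmod (hall x le_rfl h)
  | case2 x h hmod ih =>
    intro hd
    rw [pvIsPrimeB]
    simp only [dif_pos h, if_neg hmod]
    rw [PySem.Int.mod_eq_zero_iff_dvd] at hmod
    rw [ih (by omega)]
    constructor
    · intro hall e he1 he2
      rcases eq_or_lt_of_le he1 with rfl | hlt
      · exact hmod
      · exact hall e (by omega) he2
    · intro hall e he1 he2; exact hall e (by omega) he2
  | case3 x h =>
    intro hd
    rw [pvIsPrimeB]
    simp only [dif_neg h, true_iff]
    intro e he1 he2 _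
    nlinarith

-- Mathematical bridge: for 2 < i, "no divisor in [2, i)" = "no divisor d with d*d ≤ i".
theorem no_small_divisor_iff (i : Int) (hi : 2 < i) :
    (∀ d : Int, 2 ≤ d → d < i → ¬ d ∣ i) ↔ (∀ d : Int, 2 ≤ d → d * d ≤ i → ¬ d ∣ i) := by
  constructor
  · intro hall d hd1 hd2 hdvd
    exact hall d hd1 (by nlinarith) hdvd
  · intro hall d hd1 hd2 hdvd
    obtain ⟨e, he⟩ := hdvd
    have hd0 : 0 < d := by omega
    have he2 : 2 ≤ e := by nlinarith
    by_cases hsq : d * d ≤ i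
    · exact hall d hd1 hsq ⟨e, he⟩
    · have hed : e < d := by nlinarith
      have : e * e ≤ i := by nlinarith
      exact hall e he2 this ⟨d, by linarith [he, mul_comm d e]⟩

theorem trialA_iff_isPrimeB (i : Int) (hi : 2 < i) :
    pvTrialA i 2 = some i ↔ pvIsPrimeB i 2 = true := by
  rw [pvTrialA_some_iff i 2 le_rfl (by omega), pvIsPrimeB_true_iff i 2 le_rfl,
    no_small_divisor_iff i hi]

theorem pvLoopA_eq_pvLoopB (l : List Int) (hl : ∀ x ∈ l, 2 < x) :
    pvLoopA l = pvLoopB l := by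
  induction l with
  | nil => rfl
  | cons i rest ih =>
    have hi : 2 < i := hl i (List.mem_cons_self)
    have hrest : ∀ x ∈ rest, 2 < x := fun x hx => hl x (List.mem_cons_of_mem _ hx)
    rw [pvLoopA, pvLoopB]
    rcases pvTrialA_eq_none_or_self i 2 with hnone | hsome
    · have hbf : pvIsPrimeB i 2 = false := by
        rcases Bool.eq_false_or_eq_true (pvIsPrimeB i 2) with hb | hb
        · exact absurd ((trialA_iff_isPrimeB i hi).mpr hb) (by simp [hnone])
        · exact hb
      rw [hnone, hbf]
      simpa using ih hrest
    · rw [hsome]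
      have : pvIsPrimeB i 2 = true := (trialA_iff_isPrimeB i hi).mp hsome
      simp [this]

-- ===== VERDICT (by name: the statement is the Claim_ definition above) =====
theorem ganjil_prima_tertinggi_spec : Claim_equal_ganjil_prima_tertinggi := by
  intro batas _
  unfold Spec_ganjil_prima_tertinggi ganjil_prima_tertinggi ganjil_prima_tertinggi_alt
  apply pvLoopA_eq_pvLoopB
  intro x hx
  rw [PySem.List.mem_pyRange_neg_one] at hx
  omega
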